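-- pv_equiv track=rewrite | github.com/bjpl/hablas | scripts/FINAL-create-phrases-only.py | create_phrases_only_script
-- ===== SOURCE A (Python) =====
-- def create_phrases_only_script(phrases):
--     """
--     Create script with ABSOLUTE MINIMUM
--
--     Format:
--     English
--     [pause]
--     English
--     [pause]
--     Spanish
--     [pause]
--     [next phrase]
--     """
--     lines = []
--     for english, spanish in phrases:
--         # English (said by English voice)
--         lines.append(english)
--         lines.append('')
--         # English repeat (practice)
--         lines.append(english)
--         lines.append('')
--         # Spanish translation (said by Spanish voice)
--         lines.append(spanish)
--         lines.append('')
--         lines.append('')  # Longer pause between phrases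
--     return '\n'.join(lines)
-- ===== SOURCE B (Python) =====
-- def create_phrases_only_script(phrases):
--     """
--     Create script with ABSOLUTE MINIMUM.
--
--     Two-level join: within a phrase the segments (english, english, spanish)
--     are joined by a double newline, the phrase groups are joined by a triple
--     newline, and the whole script ends with a double newline.
--     """
--     if not phrases:
--         return ''
--     groups = ('\n\n'.join((english, english, spanish))
--               for english, spanish in phrases)
--     return '\n\n\n'.join(groups) + '\n\n'
-- ===== Notes on version B (the rewrite author's own statement) =====
-- stated objective: idiomatic
-- what changed: B replaces A's single flat line list (seven appended elements per phrase, with empty-string pause sentinels, joined once by '\n') with a two-level join: each phrase's three segments joined by '\n\n', the phrase groups joined by '\n\n\n', plus a trailing '\n\n'; the empty case is an explicit early return.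
import Mathlib
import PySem

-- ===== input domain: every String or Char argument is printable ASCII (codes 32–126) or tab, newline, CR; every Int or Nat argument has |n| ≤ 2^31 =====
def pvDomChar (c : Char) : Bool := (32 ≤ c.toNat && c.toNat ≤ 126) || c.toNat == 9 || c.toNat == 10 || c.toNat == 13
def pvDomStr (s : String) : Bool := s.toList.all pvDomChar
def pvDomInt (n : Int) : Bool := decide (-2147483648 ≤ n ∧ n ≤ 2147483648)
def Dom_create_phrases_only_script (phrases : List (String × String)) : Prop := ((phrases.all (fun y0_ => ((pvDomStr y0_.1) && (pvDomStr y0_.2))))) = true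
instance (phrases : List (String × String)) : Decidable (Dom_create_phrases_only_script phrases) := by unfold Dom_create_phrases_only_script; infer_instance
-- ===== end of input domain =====

-- B builds the script by a two-level join ('\n\n' inside a phrase, '\n\n\n' between
-- phrase groups, plus a trailing '\n\n') instead of A's flat line list with
-- empty-string pause sentinels joined once by '\n' (idiomatic).


-- ===== PORT A =====
def create_phrases_only_script (phrases : List (String × String)) : String :=
  let lines : List String :=
    phrases.foldl (fun acc p =>
      acc ++ [p.1, "", p.1, "", p.2, "", ""]) []
  PySem.Str.join "\n" lines

-- ===== PORT B =====
def create_phrases_only_script_alt (phrases : List (String × String)) : String :=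
  if phrases = [] then ""
  else
    let groups : List String :=
      phrases.map (fun p => PySem.Str.join "\n\n" [p.1, p.1, p.2])
    PySem.Str.join "\n\n\n" groups ++ "\n\n"

-- ===== PRECONDITION & SPEC =====
def Spec_create_phrases_only_script (phrases : List (String × String)) (out : String) : Prop := out = create_phrases_only_script_alt phrases
instance (phrases : List (String × String)) (out : String) : Decidable (Spec_create_phrases_only_script phrases out) := by unfold Spec_create_phrases_only_script; infer_instance

-- ===== CLAIM (what is proved, stated in full; the proofs are below) =====
def Claim_equal_create_phrases_only_script : Prop := ∀ (phrases : List (String × String)), Dom_create_phrases_only_script phrases → Spec_create_phrases_only_script phrases (create_phrases_only_script phrases)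

-- ===== LEMMAS AND PROOFS =====

-- A's seven char-list line contributions for one phrase
def pvLinesC (p : String × String) : List (List Char) :=
  [p.1.toList, [], p.1.toList, [], p.2.toList, [], []]

-- B's group for one phrase, as chars: english \n\n english \n\n spanish
def pvSegC (p : String × String) : List Char :=
  p.1.toList ++ ['\n','\n'] ++ p.1.toList ++ ['\n','\n'] ++ p.2.toList

theorem pvJoinKey (ps : List (String × String)) (h : ps ≠ []) :
    PySem.Chars.join ['\n'] (ps.flatMap pvLinesC) =
      PySem.Chars.join ['\n','\n','\n'] (ps.map pvSegC) ++ ['\n','\n'] := by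
  induction ps with
  | nil => exact absurd rfl h
  | cons p ps ih =>
    cases ps with
    | nil =>
      simp [pvLinesC, pvSegC, PySem.Chars.join_cons_cons, PySem.Chars.join_singleton,
        List.flatMap_cons, List.flatMap_nil]
    | cons q qs =>
      have hpeel : PySem.Chars.join ['\n'] ((p :: q :: qs).flatMap pvLinesC) =
          pvSegC p ++ ['\n','\n','\n'] ++ PySem.Chars.join ['\n'] ((q :: qs).flatMap pvLinesC) := by
        simp [pvLinesC, pvSegC, List.flatMap_cons, PySem.Chars.join_cons_cons]
      rw [hpeel, ih (by simp)]
      simp [PySem.Chars.join_cons_cons, List.map_cons]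

-- ===== VERDICT (by name: the statement is the Claim_ definition above) =====
theorem create_phrases_only_script_spec : Claim_equal_create_phrases_only_script := by
  unfold Claim_equal_create_phrases_only_script
  intro phrases _
  unfold Spec_create_phrases_only_script create_phrases_only_script create_phrases_only_script_alt
  by_cases hnil : phrases = []
  · subst hnil; rfl
  · simp only [hnil, ite_false]
    rw [← String.toList_inj]
    simp only [PySem.List.foldl_append_eq_flatMap, List.nil_append,
      PySem.Str.toList_join, String.toList_append]
    have h1 : (phrases.flatMap fun p => [p.1, "", p.1, "", p.2, "", ""]).map String.toList
        = phrases.flatMap pvLinesC := by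
      simp only [List.map_flatMap]
      rfl
    have h2 : (phrases.map fun p => PySem.Str.join "\n\n" [p.1, p.1, p.2]).map String.toList
        = phrases.map pvSegC := by
      simp only [List.map_map]
      refine List.map_congr_left (fun p _ => ?_)
      simp [Function.comp, PySem.Str.toList_join, pvSegC, PySem.Chars.join_cons_cons,
        PySem.Chars.join_singleton]
    rw [h1, h2]
    have := pvJoinKey phrases hnil
    simpa using this
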